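-- pv_equiv track=rewrite | github.com/Majezuar/Artificial-intelligence-2023-UABCS | INTELIGENCIA ARTIFICIAL/ManueZuñiga_PancakeIda.py | ida_star_permutations
-- ===== SOURCE A (Python) =====
-- def ida_star_permutations(lst, goal):
--     def h(node):
--         # Heurística consistente
--         return sum(hamming(a, b) for a, b in zip(node, goal))
--
--     def hamming(a, b):
--         # Distancia de Hamming entre dos elementos
--         return int(a != b)
--
--     letras = tuple(lst)
--     goal = tuple(goal)
--     threshold = h(letras)
--     while True:
--         next_threshold = float('inf')
--         visited = {letras: 0}
--         stack = [(h(letras), letras)]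
--         while stack:
--             f, node = stack.pop()
--             if node == goal:
--                 return node
--             if f > threshold:
--                 next_threshold = min(next_threshold, f)
--             else:
--                 for i in range(len(node)):
--                     for j in range(i + 1, len(node)):
--                         # Genera todos los posibles siguientes estados a partir de los intercambios de dos elementos
--                         next_node = node[:i] + (node[j],) + node[i+1:j] + (node[i],) + node[j+1:]
--                         g = visited[node] + 1
--                         if next_node not in visited or g < visited[next_node]:
--                             visited[next_node] = g
--                             stack.append((g + h(next_node), next_node))
--         if next_threshold == float('inf'):
--             return None
--         threshold = next_threshold
-- ===== SOURCE B (Python) =====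
-- def ida_star_permutations(lst, goal):
--     return tuple(goal) if sorted(lst) == sorted(goal) else None
-- ===== Notes on version B (the rewrite author's own statement) =====
-- stated objective: faster
-- what changed: Replaced the iterative-deepening A* search over all element-swap successors with a direct multiset-equality test (sorted comparison): the search succeeds exactly when goal is a permutation of lst, and its returned node is always the goal tuple itself. Intended as asymptotically faster; a timing run saw A time out at n=16 where B returned, but could not measure a ratio at sizes where A finishes.
import Mathlib
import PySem

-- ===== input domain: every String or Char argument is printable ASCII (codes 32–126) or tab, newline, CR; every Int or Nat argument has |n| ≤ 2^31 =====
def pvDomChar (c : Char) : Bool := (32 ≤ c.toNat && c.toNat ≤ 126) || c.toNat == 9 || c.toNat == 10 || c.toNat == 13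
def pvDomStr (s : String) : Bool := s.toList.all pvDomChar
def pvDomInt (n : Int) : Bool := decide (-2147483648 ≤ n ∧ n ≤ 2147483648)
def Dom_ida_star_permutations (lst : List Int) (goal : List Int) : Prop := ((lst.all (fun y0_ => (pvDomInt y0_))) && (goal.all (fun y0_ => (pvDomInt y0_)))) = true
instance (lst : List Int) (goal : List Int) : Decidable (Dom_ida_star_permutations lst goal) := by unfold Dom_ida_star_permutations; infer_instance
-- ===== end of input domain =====

-- B replaces A's iterative-deepening swap search by a multiset-equality (sorted-comparison) test; intended as asymptotically faster (a timing run saw A time out at n=16 where B returned, but could not measure a ratio at sizes where A finishes).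

-- ===== PORT A =====
-- hamming(a, b)
def hamA (a b : Int) : Int := if a ≠ b then 1 else 0

-- h(node) = sum(hamming(a, b) for a, b in zip(node, goal))
def hA (goal node : List Int) : Int := ((node.zip goal).map (fun p => hamA p.1 p.2)).sum

-- next_node = node[:i] + (node[j],) + node[i+1:j] + (node[i],) + node[j+1:]  (0 ≤ i < j < len node)
def swapA (node : List Int) (i j : Nat) : List Int :=
  node.take i ++ [node.getD j 0] ++ ((node.take j).drop (i + 1)) ++ [node.getD i 0] ++ node.drop (j + 1)

-- the index pairs of `for i in range(len(node)): for j in range(i+1, len(node)):`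
def pairsA (n : Nat) : List (Nat × Nat) :=
  (List.range n).flatMap (fun i => ((List.range n).drop (i + 1)).map (fun j => (i, j)))

-- one iteration of the inner double loop body
def stepA (goal node : List Int) (vs : PySem.Dict (List Int) Int × List (Int × List Int))
    (ij : Nat × Nat) : PySem.Dict (List Int) Int × List (Int × List Int) :=
  let nxt := swapA node ij.1 ij.2
  let g := vs.1.getD node 0 + 1
  match vs.1.get? nxt with
  | none => (vs.1.insert nxt g, (g + hA goal nxt, nxt) :: vs.2)
  | some w => if g < w then (vs.1.insert nxt g, (g + hA goal nxt, nxt) :: vs.2) else vs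

-- the whole double loop over i, j
def expandA (goal node : List Int) (vs : PySem.Dict (List Int) Int × List (Int × List Int)) :
    PySem.Dict (List Int) Int × List (Int × List Int) :=
  (pairsA node.length).foldl (stepA goal node) vs

-- next_threshold = min(next_threshold, f)   (none = float('inf'))
def minOptA (nt : Option Int) (f : Int) : Int :=
  match nt with
  | none => f
  | some t => min t f

-- `while stack:` — stack top at the head; Sum.inl = `return node`, Sum.inr = fell through with next_threshold
def innerA (goal : List Int) (threshold : Int) :
    Nat → PySem.Dict (List Int) Int → List (Int × List Int) → Option Int → Sum (List Int) (Option Int)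
  | 0, _, _, nt => Sum.inr nt
  | fuel + 1, vis, stack, nt =>
    match stack with
    | [] => Sum.inr nt
    | (f, node) :: rest =>
      if node = goal then Sum.inl node
      else if threshold < f then innerA goal threshold fuel vis rest (some (minOptA nt f))
      else
        let vs := expandA goal node (vis, rest)
        innerA goal threshold fuel vs.1 vs.2 nt

-- fuel bounds (proved sufficient below): the loops are driven by these, one unit per iteration
def innerFuelA (lst : List Int) : Nat := (lst.permutations.length + 2) * lst.permutations.length + 2

def outerFuelA (lst : List Int) : Nat := lst.permutations.length + lst.length + 3

-- `while True:` — each round resets visited/stack and runs the inner loop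
def outerA (lst goal : List Int) : Nat → Int → Option (List Int)
  | 0, _ => none
  | fuel + 1, threshold =>
    match innerA goal threshold (innerFuelA lst)
        (PySem.Dict.empty.insert lst 0) [(hA goal lst, lst)] none with
    | Sum.inl node => some node
    | Sum.inr none => none
    | Sum.inr (some t) => outerA lst goal fuel t

def ida_star_permutations (lst : List Int) (goal : List Int) : Option (List Int) :=
  outerA lst goal (outerFuelA lst) (hA goal lst)

-- ===== PORT B =====
def ida_star_permutations_alt (lst : List Int) (goal : List Int) : Option (List Int) :=
  if PySem.List.sorted lst (fun x => x) false = PySem.List.sorted goal (fun x => x) false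
  then some goal else none

-- ===== PRECONDITION & SPEC =====
def Spec_ida_star_permutations (lst : List Int) (goal : List Int) (out : Option (List Int)) : Prop := out = ida_star_permutations_alt lst goal
instance (lst : List Int) (goal : List Int) (out : Option (List Int)) : Decidable (Spec_ida_star_permutations lst goal out) := by unfold Spec_ida_star_permutations; infer_instance

-- ===== CLAIM (what is proved, stated in full; the proofs are below) =====
def Claim_equal_ida_star_permutations : Prop := ∀ (lst : List Int) (goal : List Int), Dom_ida_star_permutations lst goal → Spec_ida_star_permutations lst goal (ida_star_permutations lst goal)

-- ===== LEMMAS AND PROOFS =====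

-- ---- generic arithmetic / list helpers ----

theorem pvSum_map_le {α : Type} (l : List α) (f g : α → Int)
    (h : ∀ x ∈ l, f x ≤ g x) : (l.map f).sum ≤ (l.map g).sum := by
  induction l with
  | nil => simp
  | cons a l ih =>
    have h1 := h a (by simp)
    have h2 := ih (fun x hx => h x (by simp [hx]))
    simp only [List.map_cons, List.sum_cons]
    omega

theorem pvSum_map_lt {α : Type} (l : List α) (f g : α → Int) (x0 : α)
    (hx : x0 ∈ l) (hlt : f x0 < g x0)
    (h : ∀ x ∈ l, f x ≤ g x) : (l.map f).sum + 1 ≤ (l.map g).sum := by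
  induction l with
  | nil => simp at hx
  | cons a l ih =>
    simp only [List.map_cons, List.sum_cons]
    rcases List.mem_cons.mp hx with rfl | hx'
    · have := pvSum_map_le l f g (fun x hx => h x (by simp [hx]))
      omega
    · have h1 := h a (by simp)
      have := ih hx' (fun x hx => h x (by simp [hx]))
      omega

theorem pvSum_map_const {α : Type} (l : List α) (f : α → Int) (c : Int)
    (h : ∀ x ∈ l, f x ≤ c) : (l.map f).sum ≤ (l.length : Int) * c := by
  induction l with
  | nil => simp
  | cons a l ih =>
    have h1 := h a (by simp)
    have h2 := ih (fun x hx => h x (by simp [hx]))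
    simp only [List.map_cons, List.sum_cons, List.length_cons]
    push_cast
    nlinarith

theorem pvCountP_le (l : List Nat) (p q : Nat → Bool)
    (h : ∀ x ∈ l, p x = true → q x = true) : l.countP p ≤ l.countP q := by
  induction l with
  | nil => simp
  | cons a l ih =>
    have h2 := ih (fun x hx => h x (by simp [hx]))
    have h1 := h a (by simp)
    simp only [List.countP_cons]
    by_cases hp : p a = true
    · simp [hp, h1 hp]; omega
    · simp [hp]; split <;> omega

theorem pvCountP_lt (l : List Nat) (p q : Nat → Bool) (x0 : Nat)
    (hx : x0 ∈ l) (hq : q x0 = true) (hp : p x0 = false)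
    (h : ∀ x ∈ l, p x = true → q x = true) : l.countP p < l.countP q := by
  induction l with
  | nil => simp at hx
  | cons a l ih =>
    simp only [List.countP_cons]
    rcases List.mem_cons.mp hx with rfl | hx'
    · have := pvCountP_le l p q (fun x hx => h x (by simp [hx]))
      simp [hp, hq]; omega
    · have h1 := h a (by simp)
      have := ih hx' (fun x hx => h x (by simp [hx]))
      by_cases hpa : p a = true
      · simp [hpa, h1 hpa]; omega
      · simp [hpa]; split <;> omega

-- ---- hA lemmas ----

theorem hA_cons (y x : Int) (g u : List Int) :
    hA (y :: g) (x :: u) = hamA x y + hA g u := by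
  simp [hA]

theorem hA_nonneg (g u : List Int) : 0 ≤ hA g u := by
  induction u generalizing g with
  | nil => simp [hA]
  | cons x u ih =>
    cases g with
    | nil => simp [hA]
    | cons y g =>
      rw [hA_cons]
      have := ih g
      unfold hamA
      split_ifs <;> omega

theorem hA_append (X Y X' Y' : List Int) (hlen : X.length = X'.length) :
    hA (X' ++ Y') (X ++ Y) = hA X' X + hA Y' Y := by
  induction X generalizing X' with
  | nil =>
    have : X' = [] := List.length_eq_zero_iff.mp hlen.symm
    subst this; simp [hA]
  | cons x X ih =>
    cases X' with
    | nil => simp at hlen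
    | cons x' X' =>
      simp only [List.cons_append, hA_cons]
      rw [ih X' (by simpa using hlen)]
      ring

theorem hA_eq_zero (u g : List Int) (hlen : u.length = g.length) (h0 : hA g u = 0) : u = g := by
  induction u generalizing g with
  | nil =>
    have : g = [] := List.length_eq_zero_iff.mp hlen.symm
    simp [this]
  | cons x u ih =>
    cases g with
    | nil => simp at hlen
    | cons y g =>
      rw [hA_cons] at h0
      have h1 := hA_nonneg g u
      have hxy : hamA x y = 0 ∧ hA g u = 0 := by
        unfold hamA at h0 ⊢; split_ifs at h0 ⊢ <;> omega
      have hx : x = y := by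
        by_contra hne
        simp [hamA, hne] at hxy
      rw [hx, ih g (by simpa using hlen) hxy.2]

-- ---- swap lemmas ----

theorem pvGetD_append_len (b : Int) (C : List Int) : ∀ (B : List Int), (B ++ b :: C).getD B.length 0 = b := by
  intro B
  induction B with
  | nil => simp
  | cons x B ih => simpa using ih

theorem pvDrop_append_len (b : Int) (C : List Int) : ∀ (B : List Int), (B ++ b :: C).drop (B.length + 1) = C := by
  intro B
  induction B with
  | nil => simp
  | cons x B ih => simpa using ih

theorem swapA_cons (x : Int) (l : List Int) (i j : Nat) :
    swapA (x :: l) (i + 1) (j + 1) = x :: swapA l i j := by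
  simp [swapA]

theorem swapA_zero (a b : Int) (B C : List Int) :
    swapA (a :: (B ++ b :: C)) 0 (B.length + 1) = b :: (B ++ a :: C) := by
  simp only [swapA, List.take_zero, List.getD_cons_succ, List.drop_succ_cons, List.take_succ_cons,
    List.drop_one, List.nil_append]
  rw [pvGetD_append_len, pvDrop_append_len]
  simp [List.take_left]

theorem swapA_decomp : ∀ (A : List Int) (a b : Int) (B C : List Int),
    swapA (A ++ a :: (B ++ b :: C)) A.length (A.length + B.length + 1) = A ++ b :: (B ++ a :: C) := by
  intro A
  induction A with
  | nil => intro a b B C; simpa using swapA_zero a b B C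
  | cons x A ih =>
    intro a b B C
    show swapA (x :: (A ++ a :: (B ++ b :: C))) (A.length + 1) (A.length + 1 + B.length + 1) = _
    rw [show A.length + 1 + B.length + 1 = (A.length + B.length + 1) + 1 by omega]
    rw [swapA_cons, ih]
    rfl

theorem decompA (u : List Int) (p q : Nat) (hpq : p < q) (hq : q < u.length) :
    ∃ A a B b C, u = A ++ a :: (B ++ b :: C) ∧ A.length = p ∧ A.length + B.length + 1 = q ∧
      u.getD p 0 = a ∧ u.getD q 0 = b := by
  have hp : p < u.length := by omega
  refine ⟨u.take p, u[p], (u.drop (p+1)).take (q - p - 1), u[q], u.drop (q+1), ?_, ?_, ?_, ?_, ?_⟩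
  · have h1 : u.drop p = u[p] :: u.drop (p+1) := List.drop_eq_getElem_cons hp
    have h2 : u.drop (p+1) = (u.drop (p+1)).take (q-p-1) ++ (u.drop (p+1)).drop (q-p-1) :=
      (List.take_append_drop _ _).symm
    have h3 : (u.drop (p+1)).drop (q-p-1) = u.drop q := by
      rw [List.drop_drop]; congr 1; omega
    have h4 : u.drop q = u[q] :: u.drop (q+1) := List.drop_eq_getElem_cons hq
    conv_lhs => rw [← List.take_append_drop p u, h1, h2, h3, h4]
  · simp; omega
  · simp [List.length_take, List.length_drop]; omega
  · exact List.getD_eq_getElem u 0 hp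
  · exact List.getD_eq_getElem u 0 hq

theorem swapA_perm (u : List Int) (p q : Nat) (hpq : p < q) (hq : q < u.length) :
    (swapA u p q).Perm u := by
  obtain ⟨A, a, B, b, C, hu, hA', hq', _, _⟩ := decompA u p q hpq hq
  rw [hu, ← hA', ← hq', swapA_decomp]
  apply List.Perm.append_left
  have h1 : (b :: (B ++ a :: C)).Perm (B ++ b :: (a :: C)) := List.perm_middle.symm
  have h2 : (B ++ b :: a :: C).Perm (B ++ a :: b :: C) :=
    List.Perm.append_left B (List.Perm.swap a b C)
  have h3 : (B ++ a :: (b :: C)).Perm (a :: (B ++ b :: C)) := List.perm_middle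
  exact (h1.trans h2).trans h3

-- ---- mismatch / partner / monotone step ----

theorem pvCount_eq_countP_range (l : List Int) (c : Int) :
    l.count c = (List.range l.length).countP (fun k => l.getD k 0 == c) := by
  induction l with
  | nil => simp
  | cons a l ih =>
    rw [List.count_cons, List.length_cons, List.range_succ_eq_map]
    rw [List.countP_cons, List.countP_map]
    have : ((fun k => (a :: l).getD k 0 == c) ∘ Nat.succ) = (fun k => l.getD k 0 == c) := by
      funext k; simp
    rw [this, ← ih]
    by_cases h : a = c <;> simp [h]

theorem exists_mismatch (u g : List Int) (hlen : u.length = g.length) (hne : u ≠ g) :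
    ∃ i, i < u.length ∧ u.getD i 0 ≠ g.getD i 0 := by
  by_contra hcon
  push_neg at hcon
  apply hne
  apply List.ext_getElem hlen
  intro i h1 h2
  have := hcon i h1
  rwa [List.getD_eq_getElem u 0 h1, List.getD_eq_getElem g 0 h2] at this

theorem exists_partner (u g : List Int) (hperm : u.Perm g) (i : Nat)
    (hi : i < u.length) (hmis : u.getD i 0 ≠ g.getD i 0) :
    ∃ j, j < u.length ∧ u.getD j 0 = g.getD i 0 ∧ g.getD j 0 ≠ g.getD i 0 := by
  by_contra hcon
  push_neg at hcon
  have hlen := hperm.length_eq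
  have hcnt := hperm.count_eq (g.getD i 0)
  rw [pvCount_eq_countP_range, pvCount_eq_countP_range, ← hlen] at hcnt
  have hlt : (List.range u.length).countP (fun k => u.getD k 0 == g.getD i 0) <
      (List.range u.length).countP (fun k => g.getD k 0 == g.getD i 0) := by
    apply pvCountP_lt _ _ _ i (by simpa using hi)
    · simp
    · simpa using hmis
    · intro k hk hp
      simp only [List.mem_range] at hk
      simp only [beq_iff_eq] at hp ⊢
      exact hcon k hk hp
  omega

theorem hamIneq (a b c d : Int) (h1 : a ≠ c) (h2 : b ≠ d) (h3 : b = c ∨ a = d) :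
    hamA b c + hamA a d + 1 ≤ hamA a c + hamA b d := by
  unfold hamA
  rcases h3 with h | h <;> split_ifs <;> omega

theorem mono_stepA (u g : List Int) (hperm : u.Perm g) (hne : u ≠ g) :
    ∃ p q, p < q ∧ q < u.length ∧ hA g (swapA u p q) + 1 ≤ hA g u := by
  obtain ⟨i, hi, hmis⟩ := exists_mismatch u g hperm.length_eq hne
  obtain ⟨j, hj, hjc, hjg⟩ := exists_partner u g hperm i hi hmis
  have hlen := hperm.length_eq
  have hij : i ≠ j := fun h => hmis (h ▸ hjc)
  rcases lt_or_gt_of_ne hij with hlt | hgt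
  · obtain ⟨A, a, B, b, C, hu, hAl, hql, hga, hgb⟩ := decompA u i j hlt hj
    obtain ⟨A', c', B', d', C', hg, hAl', hql', hgc, hgd⟩ := decompA g i j hlt (by omega)
    have hAA : A.length = A'.length := by omega
    have hBB : B.length = B'.length := by omega
    have e1 : hA g u = hA A' A + (hamA a c' + (hA B' B + (hamA b d' + hA C' C))) := by
      rw [hu, hg, hA_append A (a :: (B ++ b :: C)) A' (c' :: (B' ++ d' :: C')) hAA,
        hA_cons, hA_append B (b :: C) B' (d' :: C') hBB, hA_cons]
    have e2 : hA g (swapA u i j) = hA A' A + (hamA b c' + (hA B' B + (hamA a d' + hA C' C))) := by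
      rw [hu, ← hAl, ← hql, swapA_decomp, hg,
        hA_append A (b :: (B ++ a :: C)) A' (c' :: (B' ++ d' :: C')) hAA,
        hA_cons, hA_append B (a :: C) B' (d' :: C') hBB, hA_cons]
    have h1 : a ≠ c' := by rw [← hga, ← hgc]; exact hmis
    have h3 : b = c' := by rw [← hgb, ← hgc]; exact hjc
    have h2 : b ≠ d' := by rw [h3]; intro h; exact hjg (by rw [hgd, hgc, h])
    have := hamIneq a b c' d' h1 h2 (Or.inl h3)
    exact ⟨i, j, hlt, hj, by omega⟩
  · obtain ⟨A, a, B, b, C, hu, hAl, hql, hga, hgb⟩ := decompA u j i hgt hi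
    obtain ⟨A', c', B', d', C', hg, hAl', hql', hgc, hgd⟩ := decompA g j i hgt (by omega)
    have hAA : A.length = A'.length := by omega
    have hBB : B.length = B'.length := by omega
    have e1 : hA g u = hA A' A + (hamA a c' + (hA B' B + (hamA b d' + hA C' C))) := by
      rw [hu, hg, hA_append A (a :: (B ++ b :: C)) A' (c' :: (B' ++ d' :: C')) hAA,
        hA_cons, hA_append B (b :: C) B' (d' :: C') hBB, hA_cons]
    have e2 : hA g (swapA u j i) = hA A' A + (hamA b c' + (hA B' B + (hamA a d' + hA C' C))) := by
      rw [hu, ← hAl, ← hql, swapA_decomp, hg,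
        hA_append A (b :: (B ++ a :: C)) A' (c' :: (B' ++ d' :: C')) hAA,
        hA_cons, hA_append B (a :: C) B' (d' :: C') hBB, hA_cons]
    have h3 : a = d' := by rw [← hga, ← hgd]; exact hjc
    have h1 : a ≠ c' := by rw [h3]; intro h; exact hjg (by rw [hgc, hgd, ← h])
    have h2 : b ≠ d' := by rw [← hgb, ← hgd]; exact hmis
    have := hamIneq a b c' d' h1 h2 (Or.inr h3)
    exact ⟨j, i, hgt, hi, by omega⟩

-- ---- search-state definitions ----

def NA (lst : List Int) : Int := (lst.permutations.length : Int)

def BA (lst : List Int) : Int := NA lst + 2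

def visSumA (lst : List Int) (vis : PySem.Dict (List Int) Int) : Int :=
  (lst.permutations.map (fun u => vis.getD u (BA lst))).sum

def PhiA (lst : List Int) (vis : PySem.Dict (List Int) Int) (stack : List (Int × List Int)) : Int :=
  visSumA lst vis + (stack.length : Int)

structure CoreA (lst : List Int) (vis : PySem.Dict (List Int) Int) (stack : List (Int × List Int)) : Prop where
  nodup : vis.keys.Nodup
  entries : ∀ u v, vis.get? u = some v → u.Perm lst ∧ 0 ≤ v ∧ v ≤ (vis.size : Int)
  start : vis.get? lst = some 0
  stackinv : ∀ f u, (f, u) ∈ stack → u.Perm lst ∧ (vis.get? u).isSome = true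

def AuxA (lst goal : List Int) (thr : Int) (vis : PySem.Dict (List Int) Int)
    (stack : List (Int × List Int)) : Prop :=
  ∀ u v, vis.get? u = some v → v + hA goal u ≤ thr →
    ((v + hA goal u, u) ∈ stack) ∨
    (u ≠ goal ∧ ∀ i j, i < j → j < u.length →
      ∃ w, vis.get? (swapA u i j) = some w ∧ w ≤ v + 1)

def AuxMidA (lst goal : List Int) (thr : Int) (node : List Int) (v0 : Int)
    (vis : PySem.Dict (List Int) Int) (stack : List (Int × List Int)) : Prop :=
  ∀ u v, vis.get? u = some v → v + hA goal u ≤ thr →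
    ((v + hA goal u, u) ∈ stack) ∨ (u = node ∧ v = v0) ∨
    (u ≠ goal ∧ ∀ i j, i < j → j < u.length →
      ∃ w, vis.get? (swapA u i j) = some w ∧ w ≤ v + 1)

theorem sizeA_le (lst : List Int) (vis : PySem.Dict (List Int) Int)
    (hnd : vis.keys.Nodup)
    (hmem : ∀ u v, vis.get? u = some v → u.Perm lst) : (vis.size : Int) ≤ NA lst := by
  have hsz : vis.size = vis.keys.length := by
    simp [PySem.Dict.size, PySem.Dict.keys]
  have hsub : ∀ x ∈ vis.keys, x ∈ lst.permutations := by
    intro x hx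
    have hne : vis.get? x ≠ none := fun h =>
      ((PySem.Dict.get?_eq_none_iff_not_mem_keys vis x).mp h) hx
    obtain ⟨v, hv⟩ := Option.ne_none_iff_exists'.mp hne
    exact List.mem_permutations.mpr (hmem x v hv)
  have h1 : vis.keys.length = vis.keys.toFinset.card := (List.toFinset_card_of_nodup hnd).symm
  have h2 : vis.keys.toFinset ⊆ lst.permutations.toFinset := by
    intro x hx
    rw [List.mem_toFinset] at hx ⊢
    exact hsub x hx
  have h3 := Finset.card_le_card h2
  have h4 := lst.permutations.toFinset_card_le
  unfold NA
  omega

theorem visSumA_nonneg (lst : List Int) (vis : PySem.Dict (List Int) Int)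
    (hent : ∀ u v, vis.get? u = some v → 0 ≤ v) : 0 ≤ visSumA lst vis := by
  have hz : (lst.permutations.map (fun _ => (0:Int))).sum = 0 := by simp
  have hB : 0 ≤ BA lst := by
    unfold BA NA
    positivity
  have := pvSum_map_le lst.permutations (fun _ => (0:Int)) (fun u => vis.getD u (BA lst)) ?_
  · unfold visSumA; omega
  · intro x _
    show (0:Int) ≤ vis.getD x (BA lst)
    rw [PySem.Dict.getD_eq_get?_getD]
    cases hg : vis.get? x with
    | none => simpa using hB
    | some v => simpa using hent x v hg

-- ---- one step of the expansion double loop ----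

theorem stepA_eq (goal node : List Int) (v0 : Int) (vis : PySem.Dict (List Int) Int)
    (stack : List (Int × List Int)) (ij : Nat × Nat) (hv0 : vis.get? node = some v0) :
    stepA goal node (vis, stack) ij =
      (match vis.get? (swapA node ij.1 ij.2) with
      | none => (vis.insert (swapA node ij.1 ij.2) (v0 + 1),
          (v0 + 1 + hA goal (swapA node ij.1 ij.2), swapA node ij.1 ij.2) :: stack)
      | some w => if v0 + 1 < w then
          (vis.insert (swapA node ij.1 ij.2) (v0 + 1),
            (v0 + 1 + hA goal (swapA node ij.1 ij.2), swapA node ij.1 ij.2) :: stack)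
          else (vis, stack)) := by
  have hgd : vis.getD node 0 = v0 := by
    rw [PySem.Dict.getD_eq_get?_getD, hv0]; rfl
  unfold stepA
  rw [hgd]

theorem stepA_push (lst goal node : List Int) (thr v0 : Int)
    (vis : PySem.Dict (List Int) Int) (stack : List (Int × List Int)) (nxt : List Int)
    (hpnxt : nxt.Perm lst)
    (hv0 : vis.get? node = some v0) (hcore : CoreA lst vis stack)
    (hold : vis.get? nxt = none ∨ ∃ w, vis.get? nxt = some w ∧ v0 + 1 < w) :
    CoreA lst (vis.insert nxt (v0 + 1)) ((v0 + 1 + hA goal nxt, nxt) :: stack) ∧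
    (vis.insert nxt (v0 + 1)).get? node = some v0 ∧
    (∀ x w, vis.get? x = some w → ∃ w', (vis.insert nxt (v0 + 1)).get? x = some w' ∧ w' ≤ w) ∧
    ((vis.insert nxt (v0 + 1)).get? nxt = some (v0 + 1)) ∧
    (visSumA lst (vis.insert nxt (v0 + 1)) + (((v0 + 1 + hA goal nxt, nxt) :: stack).length : Int) ≤
      visSumA lst vis + (stack.length : Int)) ∧
    (AuxMidA lst goal thr node v0 vis stack →
      AuxMidA lst goal thr node v0 (vis.insert nxt (v0 + 1)) ((v0 + 1 + hA goal nxt, nxt) :: stack)) := by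
  obtain ⟨hpermN, hv0nn, hv0sz⟩ := hcore.entries node v0 hv0
  have hszN : (vis.size : Int) ≤ NA lst :=
    sizeA_le lst vis hcore.nodup (fun u v hg => (hcore.entries u v hg).1)
  have hnn : nxt ≠ node := by
    intro h
    rw [h, hv0] at hold
    rcases hold with h' | ⟨w, hw, hlt⟩
    · simp at h'
    · obtain rfl : w = v0 := by simpa using hw.symm
      omega
  have hnl : nxt ≠ lst := by
    intro h
    rw [h, hcore.start] at hold
    rcases hold with h' | ⟨w, hw, hlt⟩
    · simp at h'
    · obtain rfl : w = (0:Int) := by simpa using hw.symm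
      omega
  have hget : ∀ x, (vis.insert nxt (v0 + 1)).get? x = if x = nxt then some (v0 + 1) else vis.get? x := by
    intro x; rw [PySem.Dict.get?_insert]
  have hgetD : ∀ x, (vis.insert nxt (v0 + 1)).getD x (BA lst) =
      if x = nxt then v0 + 1 else vis.getD x (BA lst) := by
    intro x; rw [PySem.Dict.getD_insert]
  have hsz : ((vis.insert nxt (v0 + 1)).size : Int) = vis.size ∨
      ((vis.insert nxt (v0 + 1)).size : Int) = vis.size + 1 := by
    rw [PySem.Dict.size_insert]
    split <;> simp
  have hszge : (vis.size : Int) ≤ ((vis.insert nxt (v0 + 1)).size : Int) := by omega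
  have hnew : (vis.insert nxt (v0 + 1)).get? nxt = some (v0 + 1) := by rw [hget]; simp
  have hvle : v0 + 1 ≤ ((vis.insert nxt (v0 + 1)).size : Int) := by
    rcases hold with h' | ⟨w, hw, hlt⟩
    · have : vis.contains nxt = false := by
        rw [PySem.Dict.contains_eq_isSome_get?, h']; rfl
      rw [PySem.Dict.size_insert, this]
      push_cast
      omega
    · have := (hcore.entries nxt w hw).2.2
      omega
  have hmono : ∀ x w, vis.get? x = some w → ∃ w', (vis.insert nxt (v0 + 1)).get? x = some w' ∧ w' ≤ w := by
    intro x w hx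
    rw [hget]
    split
    · rename_i hx_eq
      rw [hx_eq] at hx
      rcases hold with h' | ⟨w2, hw2, hlt⟩
      · rw [h'] at hx; simp at hx
      · rw [hw2] at hx
        obtain rfl : w2 = w := by simpa using hx
        exact ⟨v0 + 1, rfl, by omega⟩
    · exact ⟨w, hx, le_refl w⟩
  refine ⟨⟨?_, ?_, ?_, ?_⟩, ?_, hmono, hnew, ?_, ?_⟩
  · exact PySem.Dict.nodup_keys_insert _ _ _ hcore.nodup
  · intro u v hg
    rw [hget] at hg
    split at hg
    · rename_i hu
      obtain rfl : v = v0 + 1 := by simpa using hg.symm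
      subst hu
      exact ⟨hpnxt, by omega, hvle⟩
    · obtain ⟨h1, h2, h3⟩ := hcore.entries u v hg
      exact ⟨h1, h2, by omega⟩
  · rw [hget, if_neg hnl.symm]
    exact hcore.start
  · intro f u hm
    rcases List.mem_cons.mp hm with heq | hm'
    · obtain ⟨h1, h2⟩ := Prod.ext_iff.mp heq
      simp only at h1 h2
      subst h2
      exact ⟨hpnxt, by rw [hnew]; rfl⟩
    · obtain ⟨h1, h2⟩ := hcore.stackinv f u hm'
      refine ⟨h1, ?_⟩
      rw [hget]
      split
      · rfl
      · exact h2
  · rw [hget, if_neg (Ne.symm hnn)]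
    exact hv0
  · -- sum decrease
    have hstr : visSumA lst (vis.insert nxt (v0 + 1)) + 1 ≤ visSumA lst vis := by
      apply pvSum_map_lt lst.permutations _ _ nxt (List.mem_permutations.mpr hpnxt)
      · rw [hgetD, if_pos rfl, PySem.Dict.getD_eq_get?_getD]
        rcases hold with h' | ⟨w, hw, hlt⟩
        · rw [h']
          show v0 + 1 < BA lst
          unfold BA
          omega
        · rw [hw]
          simpa using hlt
      · intro x _
        show (vis.insert nxt (v0 + 1)).getD x (BA lst) ≤ vis.getD x (BA lst)
        rw [hgetD]
        split
        · rename_i hx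
          subst hx
          rw [PySem.Dict.getD_eq_get?_getD]
          rcases hold with h' | ⟨w, hw, hlt⟩
          · rw [h']
            show v0 + 1 ≤ BA lst
            unfold BA
            omega
          · rw [hw]
            simp
            omega
        · exact le_refl _
    simp only [List.length_cons]
    push_cast
    omega
  · -- AuxMid preservation
    intro hmid u v hg hbud
    rw [hget] at hg
    split at hg
    · rename_i hu
      obtain rfl : v = v0 + 1 := by simpa using hg.symm
      subst hu
      left
      exact List.mem_cons_self ..
    · rcases hmid u v hg hbud with hmem | hmidl | ⟨hune, hsucc⟩
      · exact Or.inl (List.mem_cons_of_mem _ hmem)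
      · exact Or.inr (Or.inl hmidl)
      · refine Or.inr (Or.inr ⟨hune, ?_⟩)
        intro i j hij hjl
        obtain ⟨w, hw, hwle⟩ := hsucc i j hij hjl
        obtain ⟨w', hw', hwle'⟩ := hmono (swapA u i j) w hw
        exact ⟨w', hw', by omega⟩

theorem stepA_spec (lst goal node : List Int) (thr v0 : Int)
    (vis : PySem.Dict (List Int) Int) (stack : List (Int × List Int)) (ij : Nat × Nat)
    (hij : ij.1 < ij.2 ∧ ij.2 < node.length)
    (hnode : node.Perm lst) (hv0 : vis.get? node = some v0)
    (hcore : CoreA lst vis stack) :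
    CoreA lst (stepA goal node (vis, stack) ij).1 (stepA goal node (vis, stack) ij).2 ∧
    (stepA goal node (vis, stack) ij).1.get? node = some v0 ∧
    (∀ x w, vis.get? x = some w → ∃ w', (stepA goal node (vis, stack) ij).1.get? x = some w' ∧ w' ≤ w) ∧
    (∃ w, (stepA goal node (vis, stack) ij).1.get? (swapA node ij.1 ij.2) = some w ∧ w ≤ v0 + 1) ∧
    (visSumA lst (stepA goal node (vis, stack) ij).1 + ((stepA goal node (vis, stack) ij).2.length : Int) ≤
      visSumA lst vis + (stack.length : Int)) ∧
    (AuxMidA lst goal thr node v0 vis stack → AuxMidA lst goal thr node v0 (stepA goal node (vis, stack) ij).1 (stepA goal node (vis, stack) ij).2) := by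
  have hpnxt : (swapA node ij.1 ij.2).Perm lst :=
    (swapA_perm node ij.1 ij.2 hij.1 hij.2).trans hnode
  rw [stepA_eq goal node v0 vis stack ij hv0]
  cases hnx : vis.get? (swapA node ij.1 ij.2) with
  | none =>
    dsimp only
    obtain ⟨h1, h2, h3, h4, h5, h6⟩ :=
      stepA_push lst goal node thr v0 vis stack (swapA node ij.1 ij.2) hpnxt hv0 hcore (Or.inl hnx)
    exact ⟨h1, h2, h3, ⟨v0 + 1, h4, le_refl _⟩, h5, h6⟩
  | some w =>
    dsimp only
    by_cases hlt : v0 + 1 < w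
    · rw [if_pos hlt]
      obtain ⟨h1, h2, h3, h4, h5, h6⟩ :=
        stepA_push lst goal node thr v0 vis stack (swapA node ij.1 ij.2) hpnxt hv0 hcore
          (Or.inr ⟨w, hnx, hlt⟩)
      exact ⟨h1, h2, h3, ⟨v0 + 1, h4, le_refl _⟩, h5, h6⟩
    · rw [if_neg hlt]
      refine ⟨hcore, hv0, ?_, ⟨w, hnx, by omega⟩, le_refl _, fun h => h⟩
      intro x w' hx
      exact ⟨w', hx, le_refl _⟩

theorem expandA_go (lst goal node : List Int) (thr v0 : Int) :
    ∀ (ps : List (Nat × Nat)) (vis : PySem.Dict (List Int) Int) (stack : List (Int × List Int)),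
    (∀ p ∈ ps, p.1 < p.2 ∧ p.2 < node.length) →
    node.Perm lst → vis.get? node = some v0 → CoreA lst vis stack →
    AuxMidA lst goal thr node v0 vis stack →
    CoreA lst (ps.foldl (stepA goal node) (vis, stack)).1 (ps.foldl (stepA goal node) (vis, stack)).2 ∧
    (∀ p ∈ ps, ∃ w, (ps.foldl (stepA goal node) (vis, stack)).1.get? (swapA node p.1 p.2) = some w ∧ w ≤ v0 + 1) ∧
    (visSumA lst (ps.foldl (stepA goal node) (vis, stack)).1 + (((ps.foldl (stepA goal node) (vis, stack)).2.length) : Int) ≤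
      visSumA lst vis + (stack.length : Int)) ∧
    AuxMidA lst goal thr node v0 (ps.foldl (stepA goal node) (vis, stack)).1 (ps.foldl (stepA goal node) (vis, stack)).2 ∧
    (∀ x w, vis.get? x = some w →
      ∃ w', (ps.foldl (stepA goal node) (vis, stack)).1.get? x = some w' ∧ w' ≤ w) := by
  intro ps
  induction ps with
  | nil =>
    intro vis stack _ _ hv0 hcore hmid
    simp only [List.foldl_nil]
    exact ⟨hcore, by simp, le_refl _, hmid, fun x w hx => ⟨w, hx, le_refl w⟩⟩
  | cons p ps ih =>
    intro vis stack hps hnode hv0 hcore hmid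
    obtain ⟨c1, c2, c3, c4, c5, c6⟩ :=
      stepA_spec lst goal node thr v0 vis stack p (hps p (List.mem_cons_self ..)) hnode hv0 hcore
    obtain ⟨C, S, Sum, A, hmonoTail⟩ :=
      ih (stepA goal node (vis, stack) p).1 (stepA goal node (vis, stack) p).2
        (fun q hq => hps q (List.mem_cons_of_mem _ hq)) hnode c2 c1 (c6 hmid)
    simp only [List.foldl_cons]
    refine ⟨?_, ?_, ?_, ?_, ?_⟩
    · exact C
    · intro q hq
      rcases List.mem_cons.mp hq with rfl | hq'
      · obtain ⟨w, hw, hwle⟩ := c4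
        obtain ⟨w', hw', hwle'⟩ := hmonoTail _ w hw
        exact ⟨w', hw', by omega⟩
      · exact S q hq'
    · calc visSumA lst ((ps.foldl (stepA goal node) ((stepA goal node (vis, stack) p).1, (stepA goal node (vis, stack) p).2)).1) +
          ((ps.foldl (stepA goal node) ((stepA goal node (vis, stack) p).1, (stepA goal node (vis, stack) p).2)).2.length : Int) ≤
          visSumA lst (stepA goal node (vis, stack) p).1 + ((stepA goal node (vis, stack) p).2.length : Int) := Sum
        _ ≤ visSumA lst vis + (stack.length : Int) := c5
    · exact A
    · intro x w hx
      obtain ⟨w1, hw1, hle1⟩ := c3 x w hx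
      obtain ⟨w2, hw2, hle2⟩ := hmonoTail x w1 hw1
      exact ⟨w2, hw2, by omega⟩

theorem pvDrop_range (n m : Nat) : (List.range n).drop m = List.range' m (n - m) := by
  rw [List.range_eq_range', List.drop_range']
  simp

theorem pairsA_mem (n : Nat) (i j : Nat) : (i, j) ∈ pairsA n ↔ i < j ∧ j < n := by
  unfold pairsA
  simp only [List.mem_flatMap, List.mem_map, List.mem_range, pvDrop_range, List.mem_range']
  constructor
  · rintro ⟨i', hi', k, ⟨⟨off, hoff, hko⟩, heq⟩⟩
    obtain ⟨h1, h2⟩ := Prod.ext_iff.mp heq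
    simp only at h1 h2
    refine ⟨?_, ?_⟩ <;> omega
  · rintro ⟨h1, h2⟩
    exact ⟨i, by omega, j, ⟨⟨j - i - 1, by omega, by omega⟩, rfl⟩⟩

-- ---- the inner loop ----

theorem innerA_run (lst goal : List Int) (thr : Int) :
    ∀ (fuel : Nat) (vis : PySem.Dict (List Int) Int) (stack : List (Int × List Int)) (nt : Option Int),
    CoreA lst vis stack → AuxA lst goal thr vis stack → PhiA lst vis stack < (fuel : Int) →
    (goal.Perm lst ∧ innerA goal thr fuel vis stack nt = Sum.inl goal) ∨
    (∃ nt' vis', innerA goal thr fuel vis stack nt = Sum.inr nt' ∧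
      CoreA lst vis' [] ∧ AuxA lst goal thr vis' []) := by
  intro fuel
  induction fuel with
  | zero =>
    intro vis stack nt hcore _ hphi
    have h1 := visSumA_nonneg lst vis (fun u v hg => (hcore.entries u v hg).2.1)
    have h2 : (0:Int) ≤ (stack.length : Int) := by positivity
    unfold PhiA at hphi
    simp only [Nat.cast_zero] at hphi
    omega
  | succ fuel ih =>
    intro vis stack nt hcore haux hphi
    cases stack with
    | nil =>
      refine Or.inr ⟨nt, vis, ?_, hcore, haux⟩
      simp [innerA]
    | cons hd rest =>
      obtain ⟨f, node⟩ := hd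
      by_cases hng : node = goal
      · left
        obtain ⟨hpn, _⟩ := hcore.stackinv f node (List.mem_cons_self ..)
        refine ⟨hng ▸ hpn, ?_⟩
        simp [innerA, hng]
      · by_cases hf : thr < f
        · have hred : innerA goal thr (fuel + 1) vis ((f, node) :: rest) nt =
              innerA goal thr fuel vis rest (some (minOptA nt f)) := by
            simp [innerA, hng, hf]
          rw [hred]
          apply ih vis rest (some (minOptA nt f))
          · exact ⟨hcore.nodup, hcore.entries, hcore.start,
              fun f' u' hm => hcore.stackinv f' u' (List.mem_cons_of_mem _ hm)⟩
          · intro u v hg hbud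
            rcases haux u v hg hbud with hmem | hb2
            · rcases List.mem_cons.mp hmem with heq | hmem'
              · obtain ⟨h1, h2⟩ := Prod.ext_iff.mp heq
                simp only at h1 h2
                omega
              · exact Or.inl hmem'
            · exact Or.inr hb2
          · unfold PhiA at hphi ⊢
            simp only [List.length_cons] at hphi
            push_cast at hphi ⊢
            omega
        · obtain ⟨hpermN, hsome⟩ := hcore.stackinv f node (List.mem_cons_self ..)
          obtain ⟨v0, hv0⟩ := Option.isSome_iff_exists.mp hsome
          have hcoreR : CoreA lst vis rest := ⟨hcore.nodup, hcore.entries, hcore.start,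
            fun f' u' hm => hcore.stackinv f' u' (List.mem_cons_of_mem _ hm)⟩
          have hmid : AuxMidA lst goal thr node v0 vis rest := by
            intro u v hg hbud
            rcases haux u v hg hbud with hmem | ⟨hune, hsucc⟩
            · rcases List.mem_cons.mp hmem with heq | hmem'
              · obtain ⟨h1, h2⟩ := Prod.ext_iff.mp heq
                simp only at h1 h2
                refine Or.inr (Or.inl ⟨h2, ?_⟩)
                rw [h2] at hg
                rw [hg] at hv0
                exact (Option.some.injEq .. ▸ hv0).symm ▸ rfl
              · exact Or.inl hmem'
            · exact Or.inr (Or.inr ⟨hune, hsucc⟩)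
          obtain ⟨C, S, Sum, A, M⟩ :=
            expandA_go lst goal node thr v0 (pairsA node.length) vis rest
              (fun p hp => by
                have := (pairsA_mem node.length p.1 p.2).mp (by cases p; exact hp)
                exact this)
              hpermN hv0 hcoreR hmid
          have hauxNew : AuxA lst goal thr
              ((pairsA node.length).foldl (stepA goal node) (vis, rest)).1
              ((pairsA node.length).foldl (stepA goal node) (vis, rest)).2 := by
            intro u v hg hbud
            rcases A u v hg hbud with hmem | ⟨hun, hveq⟩ | hb2
            · exact Or.inl hmem
            · refine Or.inr ⟨hun ▸ hng, ?_⟩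
              intro i j hijlt hjl
              have hjl' : j < node.length := hun ▸ hjl
              obtain ⟨w, hw, hwle⟩ := S (i, j) ((pairsA_mem node.length i j).mpr ⟨hijlt, hjl'⟩)
              refine ⟨w, ?_, by omega⟩
              rw [hun]
              exact hw
            · exact Or.inr hb2
          have hred : innerA goal thr (fuel + 1) vis ((f, node) :: rest) nt =
              innerA goal thr fuel (expandA goal node (vis, rest)).1 (expandA goal node (vis, rest)).2 nt := by
            simp [innerA, hng, hf]
          rw [hred]
          apply ih (expandA goal node (vis, rest)).1 (expandA goal node (vis, rest)).2 nt C hauxNew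
          unfold PhiA at hphi ⊢
          simp only [List.length_cons] at hphi
          push_cast at hphi ⊢
          have : visSumA lst (expandA goal node (vis, rest)).1 +
              ((expandA goal node (vis, rest)).2.length : Int) ≤
              visSumA lst vis + (rest.length : Int) := Sum
          omega

theorem deadEndA (lst goal : List Int) (thr : Int) (vis : PySem.Dict (List Int) Int)
    (hperm : lst.Perm goal) (hthr : hA goal lst ≤ thr)
    (hcore : CoreA lst vis []) (haux : AuxA lst goal thr vis []) : False := by
  have main : ∀ (k : Nat) (u : List Int) (v : Int), u.Perm goal → vis.get? u = some v →
      v + hA goal u ≤ thr → (hA goal u).toNat ≤ k → False := by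
    intro k
    induction k with
    | zero =>
      intro u v hp hg hbud hk
      have hnn := hA_nonneg goal u
      have h0 : hA goal u = 0 := by omega
      obtain rfl : u = goal := hA_eq_zero u goal hp.length_eq h0
      rcases haux u v hg hbud with hmem | ⟨hne, _⟩
      · simp at hmem
      · exact hne rfl
    | succ k ih =>
      intro u v hp hg hbud hk
      by_cases hug : u = goal
      · subst hug
        rcases haux u v hg hbud with hmem | ⟨hne, _⟩
        · simp at hmem
        · exact hne rfl
      · rcases haux u v hg hbud with hmem | ⟨_, hsucc⟩
        · simp at hmem
        · obtain ⟨p, q, hpq, hql, hdec⟩ := mono_stepA u goal hp hug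
          obtain ⟨w, hw, hwle⟩ := hsucc p q hpq hql
          have hperm' : (swapA u p q).Perm goal := (swapA_perm u p q hpq hql).trans hp
          have hnn1 := hA_nonneg goal u
          have hnn2 := hA_nonneg goal (swapA u p q)
          exact ih (swapA u p q) w hperm' hw (by omega) (by omega)
  exact main (hA goal lst).toNat lst 0 hperm hcore.start (by omega)
    (le_refl _)

-- ---- initial state ----

theorem pvGet?_init (lst u : List Int) :
    (PySem.Dict.empty.insert lst (0:Int)).get? u = if u = lst then some 0 else none := by
  rw [PySem.Dict.get?_insert]
  split <;> simp [PySem.Dict.get?_empty]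

theorem core0 (lst goal : List Int) :
    CoreA lst (PySem.Dict.empty.insert lst 0) [(hA goal lst, lst)] := by
  have hsz : (PySem.Dict.empty.insert lst (0:Int)).size = 1 := by
    rw [PySem.Dict.size_insert]
    simp [PySem.Dict.contains_empty, PySem.Dict.size_empty]
  refine ⟨?_, ?_, ?_, ?_⟩
  · exact PySem.Dict.nodup_keys_insert _ _ _ PySem.Dict.nodup_keys_empty
  · intro u v hg
    rw [pvGet?_init] at hg
    split at hg
    · rename_i h
      obtain rfl : v = (0:Int) := by simpa using hg.symm
      exact ⟨by rw [h], by omega, by rw [hsz]; omega⟩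
    · simp at hg
  · rw [pvGet?_init]; simp
  · intro f u hm
    simp only [List.mem_singleton, Prod.mk.injEq] at hm
    refine ⟨by rw [hm.2], ?_⟩
    rw [hm.2, pvGet?_init]; simp

theorem aux0 (lst goal : List Int) (thr : Int) :
    AuxA lst goal thr (PySem.Dict.empty.insert lst 0) [(hA goal lst, lst)] := by
  intro u v hg _
  rw [pvGet?_init] at hg
  split at hg
  · rename_i h
    obtain rfl : v = (0:Int) := by simpa using hg.symm
    left
    rw [h]
    simp
  · simp at hg

theorem phi0 (lst goal : List Int) :
    PhiA lst (PySem.Dict.empty.insert lst 0) [(hA goal lst, lst)] < ((innerFuelA lst : Nat) : Int) := by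
  have hB : 0 ≤ BA lst := by unfold BA NA; positivity
  have hsum : visSumA lst (PySem.Dict.empty.insert lst 0) ≤ (lst.permutations.length : Int) * BA lst := by
    apply pvSum_map_const
    intro x _
    rw [PySem.Dict.getD_eq_get?_getD, pvGet?_init]
    split <;> simp [hB]
  have hcast : ((innerFuelA lst : Nat) : Int) = (NA lst + 2) * NA lst + 2 := by
    unfold innerFuelA NA
    push_cast
    ring
  have hNB : (lst.permutations.length : Int) * BA lst = (NA lst + 2) * NA lst := by
    unfold BA NA; ring
  unfold PhiA
  rw [hcast]
  rw [hNB] at hsum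
  simp only [List.length_singleton]
  have : (NA lst + 2) * NA lst = (NA lst + 2) * NA lst := rfl
  omega

-- ---- the outer loop ----

theorem outer_perm (lst goal : List Int) (hp : lst.Perm goal) (fuel : Nat) :
    outerA lst goal (fuel + 1) (hA goal lst) = some goal := by
  rcases innerA_run lst goal (hA goal lst) (innerFuelA lst) (PySem.Dict.empty.insert lst 0)
      [(hA goal lst, lst)] none (core0 lst goal) (aux0 lst goal (hA goal lst)) (phi0 lst goal) with
    ⟨_, heq⟩ | ⟨nt', vis', heq, hc, ha⟩
  · simp only [outerA]
    rw [heq]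
  · exact (deadEndA lst goal (hA goal lst) vis' hp (le_refl _) hc ha).elim

theorem outer_notperm (lst goal : List Int) (hp : ¬ lst.Perm goal) :
    ∀ (fuel : Nat) (thr : Int), outerA lst goal fuel thr = none := by
  intro fuel
  induction fuel with
  | zero => intro thr; rfl
  | succ fuel ih =>
    intro thr
    rcases innerA_run lst goal thr (innerFuelA lst) (PySem.Dict.empty.insert lst 0)
        [(hA goal lst, lst)] none (core0 lst goal) (aux0 lst goal thr) (phi0 lst goal) with
      ⟨hp2, _⟩ | ⟨nt', vis', heq, _, _⟩
    · exact (hp hp2.symm).elim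
    · simp only [outerA]
      rw [heq]
      cases nt' with
      | none => rfl
      | some t => exact ih t

theorem main_equiv (lst goal : List Int) :
    ida_star_permutations lst goal = ida_star_permutations_alt lst goal := by
  by_cases hp : lst.Perm goal
  · have halt : ida_star_permutations_alt lst goal = some goal := by
      unfold ida_star_permutations_alt
      rw [if_pos ((PySem.List.sorted_id_eq_sorted_id_iff_perm lst goal).mpr hp)]
    have hfuel : outerFuelA lst = (lst.permutations.length + lst.length + 2) + 1 := by
      unfold outerFuelA
      omega
    unfold ida_star_permutations
    rw [hfuel, outer_perm lst goal hp, halt]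
  · unfold ida_star_permutations ida_star_permutations_alt
    rw [outer_notperm lst goal hp,
      if_neg (fun h => hp ((PySem.List.sorted_id_eq_sorted_id_iff_perm lst goal).mp h))]

-- ===== VERDICT (by name: the statement is the Claim_ definition above) =====
theorem ida_star_permutations_spec : Claim_equal_ida_star_permutations := by
  intro lst goal _
  exact main_equiv lst goal
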